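-- pv_equiv track=rewrite | github.com/ilSommo/advent-of-code-2019 | day_16.py | compute_pattern
-- ===== SOURCE A (Python) =====
-- def compute_pattern(i, length):
--     """Computer a single pattern."""
--     add = []
--     sub = []
--
--     i += 1
--     j = i
--
--     while j < length + 1:
--         add.extend([k - 1 for k in range(j, min(j + i, length + 1))])
--         j += 2 * i
--
--         if j < length + 1:
--             sub.extend([k - 1 for k in range(j, min(j + i, length + 1))])
--             j += 2 * i
--
--     return (tuple(add), tuple(sub))
-- ===== SOURCE B (Python) =====
-- def compute_pattern(i, length):
--     """Compute a single pattern by classifying each position's phase.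
--
--     Positions below i always fall in the leading phase-0 block, so they
--     are skipped outright.
--     """
--     b = i + 1
--     add = tuple(pos for pos in range(i, length) if (pos + 1) // b % 4 == 1)
--     sub = tuple(pos for pos in range(i, length) if (pos + 1) // b % 4 == 3)
--     return (add, sub)
-- ===== Notes on version B (the rewrite author's own statement) =====
-- stated objective: simpler
-- what changed: Replaces the block-jumping while loop with nested range-extends by a direct per-position classification: each position pos in range(i, length) goes to add iff ((pos+1)//(i+1)) % 4 == 1 and to sub iff it is 3 (positions below i are phase 0 and skipped).
import Mathlib
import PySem

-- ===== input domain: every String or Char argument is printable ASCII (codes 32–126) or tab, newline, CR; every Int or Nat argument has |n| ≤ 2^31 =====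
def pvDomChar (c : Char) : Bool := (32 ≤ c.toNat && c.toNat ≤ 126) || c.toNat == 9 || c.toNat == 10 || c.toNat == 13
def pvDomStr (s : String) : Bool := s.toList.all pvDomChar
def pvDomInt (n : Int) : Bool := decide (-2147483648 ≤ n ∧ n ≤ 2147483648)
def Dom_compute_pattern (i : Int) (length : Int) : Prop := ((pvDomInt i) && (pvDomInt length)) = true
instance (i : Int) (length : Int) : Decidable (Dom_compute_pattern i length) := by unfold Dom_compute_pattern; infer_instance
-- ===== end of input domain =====

-- B replaces A's block-jumping while loop by a single per-position phase classification (simpler, same O(length) cost).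

-- ===== PORT A =====
-- [k - 1 for k in range(lo, hi)]
def pvABlock (lo hi : Int) : List Int :=
  (PySem.List.pyRange lo hi 1).map (fun k => k - 1)

-- A's while loop; fuel only makes the recursion total (inside Pre_ it is ample, see compute_pattern)
def pvALoop : Nat → Int → Int → Int → List Int → List Int → List Int × List Int
  | 0, _, _, _, add, sub => (add, sub)
  | Nat.succ n, b, L, j, add, sub =>
    if j < L + 1 then
      if j + 2 * b < L + 1 then
        pvALoop n b L (j + 2 * b + 2 * b)
          (add ++ pvABlock j (min (j + b) (L + 1)))
          (sub ++ pvABlock (j + 2 * b) (min (j + 2 * b + b) (L + 1)))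
      else (add ++ pvABlock j (min (j + b) (L + 1)), sub)
    else (add, sub)

def compute_pattern (i : Int) (length : Int) : List Int × List Int :=
  pvALoop ((length + 1 - (i + 1)).toNat + 1) (i + 1) length (i + 1) [] []

-- ===== PORT B =====
-- (pos + 1) // b % 4
def pvPhase (b pos : Int) : Int :=
  PySem.Int.mod (PySem.Int.floordiv (pos + 1) b) 4

def compute_pattern_alt (i : Int) (length : Int) : List Int × List Int :=
  ((PySem.List.pyRange i length 1).filter (fun pos => pvPhase (i + 1) pos == 1),
   (PySem.List.pyRange i length 1).filter (fun pos => pvPhase (i + 1) pos == 3))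

-- ===== PRECONDITION & SPEC =====
-- Pre_ excludes exactly the inputs on which A's while loop never terminates
-- (i ≤ -1 with i < length: the block size i+1 is ≤ 0, so j never increases).
def Pre_compute_pattern (i : Int) (length : Int) : Prop := 0 ≤ i ∨ length ≤ i
instance (i : Int) (length : Int) : Decidable (Pre_compute_pattern i length) := by
  unfold Pre_compute_pattern; infer_instance

def pvWitness_compute_pattern : Int × Int := (1, 8)

def Spec_compute_pattern (i : Int) (length : Int) (out : List Int × List Int) : Prop := out = compute_pattern_alt i length
instance (i : Int) (length : Int) (out : List Int × List Int) : Decidable (Spec_compute_pattern i length out) := by unfold Spec_compute_pattern; infer_instance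

-- ===== CLAIM (what is proved, stated in full; the proofs are below) =====
def Claim_equal_compute_pattern : Prop := ∀ (i : Int) (length : Int), Dom_compute_pattern i length → Pre_compute_pattern i length → Spec_compute_pattern i length (compute_pattern i length)

-- ===== LEMMAS AND PROOFS =====

lemma pvABlock_eq (lo hi : Int) :
    pvABlock lo hi = PySem.List.pyRange (lo - 1) (hi - 1) 1 := by
  unfold pvABlock
  rw [PySem.List.pyRange_one, PySem.List.pyRange_one, List.map_map]
  have h : hi - 1 - (lo - 1) = hi - lo := by ring
  rw [h]
  apply List.map_congr_left
  intro k _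
  simp only [Function.comp_apply]
  ring

lemma pyRange_filter_all (p : Int → Bool) (lo hi : Int)
    (h : ∀ x, lo ≤ x → x < hi → p x = true) :
    (PySem.List.pyRange lo hi 1).filter p = PySem.List.pyRange lo hi 1 := by
  rw [List.filter_eq_self]
  intro x hx
  rcases PySem.List.mem_pyRange_one.mp hx with ⟨h1, h2⟩
  exact h x h1 h2

lemma pyRange_filter_none (p : Int → Bool) (lo hi : Int)
    (h : ∀ x, lo ≤ x → x < hi → p x = false) :
    (PySem.List.pyRange lo hi 1).filter p = [] := by
  rw [List.filter_eq_nil_iff]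
  intro x hx
  rcases PySem.List.mem_pyRange_one.mp hx with ⟨h1, h2⟩
  simp [h x h1 h2]

lemma phase_val (b q pos : Int) (hb : 0 < b) (h1 : q * b ≤ pos + 1)
    (h2 : pos + 1 < (q + 1) * b) : pvPhase b pos = q % 4 := by
  unfold pvPhase
  rw [(PySem.Int.floordiv_eq_iff_of_pos hb).mpr ⟨h1, h2⟩,
    PySem.Int.mod_eq_emod_of_pos (by norm_num)]

-- A's loop starting at the (4t+1)-th block collects exactly the phase-1 / phase-3
-- positions ≥ j - 1.
lemma pvALoop_eq (b L : Int) (hb : 1 ≤ b) :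
    ∀ (fuel : Nat) (t j : Int) (add sub : List Int), 0 ≤ t → j = (4 * t + 1) * b →
    (L + 1 - j).toNat < fuel →
    pvALoop fuel b L j add sub =
      (add ++ (PySem.List.pyRange (j - 1) L 1).filter (fun pos => pvPhase b pos == 1),
       sub ++ (PySem.List.pyRange (j - 1) L 1).filter (fun pos => pvPhase b pos == 3)) := by
  intro fuel
  induction fuel with
  | zero => intro t j add sub ht hj hf; omega
  | succ n ih =>
    intro t j add sub ht hj hf
    by_cases hjL : j < L + 1
    · by_cases hj2 : j + 2 * b < L + 1
      · -- recursive case: one add block, one sub block, recurse at j + 4b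
        have hb4 : j + 2 * b + 2 * b = (4 * (t + 1) + 1) * b := by rw [hj]; ring
        have hrec := ih (t + 1) (j + 2 * b + 2 * b)
          (add ++ pvABlock j (min (j + b) (L + 1)))
          (sub ++ pvABlock (j + 2 * b) (min (j + 2 * b + b) (L + 1)))
          (by omega) hb4 (by omega)
        simp only [pvALoop, if_pos hjL, if_pos hj2, hrec]
        rw [Prod.mk.injEq]
        -- boundaries of the five phase segments
        set m2 : Int := min (j + 3 * b - 1) L with hm2
        set m : Int := min (j + 4 * b - 1) L with hm
        have hmin1 : min (j + b) (L + 1) = j + b := by omega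
        have hmin2 : min (j + 2 * b + b) (L + 1) - 1 = m2 := by omega
        have hsplit : PySem.List.pyRange (j - 1) L 1 =
            PySem.List.pyRange (j - 1) (j + b - 1) 1 ++
            (PySem.List.pyRange (j + b - 1) (j + 2 * b - 1) 1 ++
            (PySem.List.pyRange (j + 2 * b - 1) m2 1 ++
            (PySem.List.pyRange m2 m 1 ++ PySem.List.pyRange m L 1))) := by
          rw [← PySem.List.pyRange_one_append m2 m L (by omega) (by omega),
            ← PySem.List.pyRange_one_append (j + 2 * b - 1) m2 L (by omega) (by omega),
            ← PySem.List.pyRange_one_append (j + b - 1) (j + 2 * b - 1) L (by omega) (by omega),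
            ← PySem.List.pyRange_one_append (j - 1) (j + b - 1) L (by omega) (by omega)]
        have hS1 : ∀ x, j - 1 ≤ x → x < j + b - 1 → pvPhase b x = 1 := by
          intro x hx1 hx2
          rw [phase_val b (4 * t + 1) x (by omega) (by nlinarith) (by nlinarith)]
          omega
        have hS2 : ∀ x, j + b - 1 ≤ x → x < j + 2 * b - 1 → pvPhase b x = 2 := by
          intro x hx1 hx2
          rw [phase_val b (4 * t + 2) x (by omega) (by nlinarith) (by nlinarith)]
          omega
        have hS3 : ∀ x, j + 2 * b - 1 ≤ x → x < m2 → pvPhase b x = 3 := by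
          intro x hx1 hx2
          have hx2' : x < j + 3 * b - 1 := by omega
          rw [phase_val b (4 * t + 3) x (by omega) (by nlinarith) (by nlinarith)]
          omega
        have hS4 : ∀ x, m2 ≤ x → x < m → pvPhase b x = 0 := by
          intro x hx1 hx2
          have hx1' : j + 3 * b - 1 ≤ x := by omega
          have hx2' : x < j + 4 * b - 1 := by omega
          rw [phase_val b (4 * t + 4) x (by omega) (by nlinarith) (by nlinarith)]
          omega
        have htail : ∀ p : Int → Bool,
            (PySem.List.pyRange m L 1).filter p =
            (PySem.List.pyRange (j + 2 * b + 2 * b - 1) L 1).filter p := by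
          intro p
          by_cases hcase : j + 4 * b - 1 ≤ L
          · have : m = j + 4 * b - 1 := by omega
            rw [this]; ring_nf
          · rw [PySem.List.pyRange_one_eq_nil (show L ≤ m by omega),
              PySem.List.pyRange_one_eq_nil (by omega)]
        refine ⟨?_, ?_⟩
        · -- add component
          have hadd : (PySem.List.pyRange (j - 1) L 1).filter (fun pos => pvPhase b pos == 1) =
              PySem.List.pyRange (j - 1) (j + b - 1) 1 ++
              (PySem.List.pyRange (j + 2 * b + 2 * b - 1) L 1).filter
                (fun pos => pvPhase b pos == 1) := by
            rw [hsplit]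
            simp only [List.filter_append]
            rw [pyRange_filter_all _ _ _ (fun x h1 h2 => by simp [hS1 x h1 h2]),
              pyRange_filter_none _ _ _ (fun x h1 h2 => by simp [hS2 x h1 h2]),
              pyRange_filter_none _ _ _ (fun x h1 h2 => by simp [hS3 x h1 h2]),
              pyRange_filter_none _ _ _ (fun x h1 h2 => by simp [hS4 x h1 h2]),
              htail]
            simp
          rw [hadd, pvABlock_eq, hmin1]
          simp
        · -- sub component
          have hsub : (PySem.List.pyRange (j - 1) L 1).filter (fun pos => pvPhase b pos == 3) =
              PySem.List.pyRange (j + 2 * b - 1) m2 1 ++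
              (PySem.List.pyRange (j + 2 * b + 2 * b - 1) L 1).filter
                (fun pos => pvPhase b pos == 3) := by
            rw [hsplit]
            simp only [List.filter_append]
            rw [pyRange_filter_none _ _ _ (fun x h1 h2 => by simp [hS1 x h1 h2]),
              pyRange_filter_none _ _ _ (fun x h1 h2 => by simp [hS2 x h1 h2]),
              pyRange_filter_all _ _ _ (fun x h1 h2 => by simp [hS3 x h1 h2]),
              pyRange_filter_none _ _ _ (fun x h1 h2 => by simp [hS4 x h1 h2]),
              htail]
            simp
          rw [hsub, pvABlock_eq, hmin2]
          simp
      · -- last add block, then the loop exits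
        simp only [pvALoop, if_pos hjL, if_neg hj2]
        rw [Prod.mk.injEq]
        set m : Int := min (j + b - 1) L with hm
        have hmin1 : min (j + b) (L + 1) - 1 = m := by omega
        have hsplit : PySem.List.pyRange (j - 1) L 1 =
            PySem.List.pyRange (j - 1) m 1 ++ PySem.List.pyRange m L 1 :=
          PySem.List.pyRange_one_append (j - 1) m L (by omega) (by omega)
        have hS1 : ∀ x, j - 1 ≤ x → x < m → pvPhase b x = 1 := by
          intro x hx1 hx2
          have hx2' : x < j + b - 1 := by omega
          rw [phase_val b (4 * t + 1) x (by omega) (by nlinarith) (by nlinarith)]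
          omega
        have hS2 : ∀ x, m ≤ x → x < L → pvPhase b x = 2 := by
          intro x hx1 hx2
          have hx1' : j + b - 1 ≤ x := by omega
          have hx2' : x + 1 < j + 2 * b := by omega
          rw [phase_val b (4 * t + 2) x (by omega) (by nlinarith) (by nlinarith)]
          omega
        refine ⟨?_, ?_⟩
        · rw [hsplit]
          simp only [List.filter_append]
          rw [pyRange_filter_all _ _ _ (fun x h1 h2 => by simp [hS1 x h1 h2]),
            pyRange_filter_none _ _ _ (fun x h1 h2 => by simp [hS2 x h1 h2]),
            pvABlock_eq, hmin1]
          simp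
        · rw [hsplit]
          simp only [List.filter_append]
          rw [pyRange_filter_none _ _ _ (fun x h1 h2 => by simp [hS1 x h1 h2]),
            pyRange_filter_none _ _ _ (fun x h1 h2 => by simp [hS2 x h1 h2])]
          simp
    · -- loop never entered
      have hnil : PySem.List.pyRange (j - 1) L 1 = [] :=
        PySem.List.pyRange_one_eq_nil (by omega)
      simp only [pvALoop, if_neg hjL]
      simp [hnil]

-- ===== VERDICT (by name: the statement is the Claim_ definition above) =====
theorem compute_pattern_spec : Claim_equal_compute_pattern := by
  intro i L _ hpre
  show compute_pattern i L = compute_pattern_alt i L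
  unfold compute_pattern compute_pattern_alt
  by_cases h1 : L ≤ i
  · -- the loop exits immediately, and B's range i..length is empty
    have hA : pvALoop ((L + 1 - (i + 1)).toNat + 1) (i + 1) L (i + 1) [] [] = ([], []) := by
      simp only [pvALoop, if_neg (show ¬ (i + 1 < L + 1) by omega)]
    rw [hA, PySem.List.pyRange_one_eq_nil h1]
    simp
  · -- 0 ≤ i < L: the loop invariant at t = 0, j = i + 1
    have hi : 0 ≤ i := by rcases hpre with h | h; exact h; omega
    rw [pvALoop_eq (i + 1) L (by omega) _ 0 (i + 1) [] [] (by omega) (by ring)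
      (by omega)]
    simp
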